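-- pv_equiv track=rewrite | github.com/PeterEckmann1/aswg-pipeline | utils/sciscore/sciscore_api.py | _fix_sent
-- ===== SOURCE A (Python) =====
-- def _fix_sent(sentence, doc_no_whitespace, whitespace_locs):
--     sentence_no_whitespace = sentence.replace(' ', '')
--     sent_loc = doc_no_whitespace.find(sentence_no_whitespace)
--     fixed_sent = ''
--     for j, i in enumerate(range(sent_loc, sent_loc + len(sentence_no_whitespace))):
--         if i in whitespace_locs:
--             fixed_sent += ' '
--         fixed_sent += sentence_no_whitespace[j]
--     return fixed_sent.strip()
-- ===== SOURCE B (Python) =====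
-- def _fix_sent(sentence, doc_no_whitespace, whitespace_locs):
--     s = sentence.replace(' ', '')
--     loc = doc_no_whitespace.find(s)
--     rels = sorted({i - loc for i in whitespace_locs if 0 <= i - loc < len(s)})
--     parts = []
--     prev = 0
--     for r in rels:
--         parts.append(s[prev:r])
--         prev = r
--     parts.append(s[prev:])
--     return ' '.join(parts).strip()
-- ===== Notes on version B (the rewrite author's own statement) =====
-- stated objective: alternative
-- what changed: Instead of scanning every character of the stripped sentence and testing each absolute position against whitespace_locs, B computes the in-range break offsets once (set comprehension + sort over whitespace_locs), then splits the stripped sentence at those offsets and joins the slices with spaces.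
import Mathlib
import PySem

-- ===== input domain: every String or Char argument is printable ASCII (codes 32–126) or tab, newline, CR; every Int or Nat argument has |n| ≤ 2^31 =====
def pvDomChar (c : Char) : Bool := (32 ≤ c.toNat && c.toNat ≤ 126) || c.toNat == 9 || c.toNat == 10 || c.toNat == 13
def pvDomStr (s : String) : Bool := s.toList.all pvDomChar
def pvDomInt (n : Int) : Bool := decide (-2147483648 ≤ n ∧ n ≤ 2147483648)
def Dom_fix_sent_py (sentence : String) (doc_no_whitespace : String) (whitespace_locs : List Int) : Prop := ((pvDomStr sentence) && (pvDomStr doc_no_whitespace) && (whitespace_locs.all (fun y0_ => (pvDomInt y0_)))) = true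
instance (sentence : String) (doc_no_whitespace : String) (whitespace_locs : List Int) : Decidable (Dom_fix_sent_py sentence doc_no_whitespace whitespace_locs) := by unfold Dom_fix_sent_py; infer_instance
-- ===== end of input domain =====

-- B replaces A's per-character scan (membership test at every absolute position) by computing the
-- sorted in-range break offsets once and joining the slices of the stripped sentence with spaces.


-- ===== PORT A =====
def fix_sent_py (sentence : String) (doc_no_whitespace : String) (whitespace_locs : List Int) : String :=
  let snw : List Char := PySem.Chars.replace sentence.toList [' '] []
  let sentLoc : Int := PySem.Chars.find doc_no_whitespace.toList snw
  let fixed : List Char :=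
    (PySem.List.enumerate (PySem.List.pyRange sentLoc (sentLoc + (snw.length : Int)))).foldl
      (fun acc ji =>
        (if whitespace_locs.contains ji.2 then acc ++ [' '] else acc) ++
          ((PySem.List.pyGet? snw ji.1).map (fun c => [c])).getD [])
      []
  String.ofList (PySem.Chars.strip fixed)

-- ===== PORT B =====
def fix_sent_py_alt (sentence : String) (doc_no_whitespace : String) (whitespace_locs : List Int) : String :=
  let s : List Char := PySem.Chars.replace sentence.toList [' '] []
  let loc : Int := PySem.Chars.find doc_no_whitespace.toList s
  let rels : List Int :=
    PySem.List.sorted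
      (PySem.Set.ofList
        ((whitespace_locs.filter
            (fun i => decide (0 ≤ i - loc) && decide (i - loc < (s.length : Int)))).map
          (fun i => i - loc)))
      (fun x => x)
  let st := rels.foldl
    (fun (st : List (List Char) × Int) r =>
      (st.1 ++ [PySem.List.slice s (some st.2) (some r)], r)) ([], 0)
  let parts := st.1 ++ [PySem.List.slice s (some st.2) none]
  String.ofList (PySem.Chars.strip (PySem.Chars.join [' '] parts))

-- ===== PRECONDITION & SPEC =====
def Spec_fix_sent_py (sentence : String) (doc_no_whitespace : String) (whitespace_locs : List Int) (out : String) : Prop := out = fix_sent_py_alt sentence doc_no_whitespace whitespace_locs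
instance (sentence : String) (doc_no_whitespace : String) (whitespace_locs : List Int) (out : String) : Decidable (Spec_fix_sent_py sentence doc_no_whitespace whitespace_locs out) := by unfold Spec_fix_sent_py; infer_instance

-- ===== CLAIM (what is proved, stated in full; the proofs are below) =====
def Claim_equal_fix_sent_py : Prop := ∀ (sentence : String) (doc_no_whitespace : String) (whitespace_locs : List Int), Dom_fix_sent_py sentence doc_no_whitespace whitespace_locs → Spec_fix_sent_py sentence doc_no_whitespace whitespace_locs (fix_sent_py sentence doc_no_whitespace whitespace_locs)

-- ===== LEMMAS AND PROOFS =====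

-- A's loop, abstractly: insert a space before position j of t whenever q j holds (t a suffix of the
-- sentence starting at absolute index j).
def pvIns (t : List Char) (j : Nat) (q : Nat → Bool) : List Char :=
  match t with
  | [] => []
  | c :: cs => (if q j then [' '] else []) ++ c :: pvIns cs (j + 1) q

-- like pvIns but the first position is not tested (its space was already emitted as a separator)
def pvInsTail (t : List Char) (j : Nat) (q : Nat → Bool) : List Char :=
  match t with
  | [] => []
  | c :: cs => c :: pvIns cs (j + 1) q

-- the list of parts B's loop appends, and the final value of prev
def pvBP (s : List Char) : List Int → Int → List (List Char)
  | [], _ => []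
  | r :: rs, prev => PySem.List.slice s (some prev) (some r) :: pvBP s rs r

def pvLast : List Int → Int → Int
  | [], prev => prev
  | r :: rs, _ => pvLast rs r

lemma pv_fold_bp (s : List Char) (rels : List Int) (parts : List (List Char)) (prev : Int) :
    rels.foldl
      (fun (st : List (List Char) × Int) r =>
        (st.1 ++ [PySem.List.slice s (some st.2) (some r)], r)) (parts, prev)
      = (parts ++ pvBP s rels prev, pvLast rels prev) := by
  induction rels generalizing parts prev with
  | nil => simp [pvBP, pvLast]
  | cons r rs ih => simp [pvBP, pvLast, ih]

lemma pv_ins_append (u v : List Char) (j : Nat) (q : Nat → Bool) :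
    pvIns (u ++ v) j q = pvIns u j q ++ pvIns v (j + u.length) q := by
  induction u generalizing j with
  | nil => simp [pvIns]
  | cons c cs ih =>
      simp only [List.cons_append, pvIns, ih, List.length_cons]
      have : j + 1 + cs.length = j + (cs.length + 1) := by omega
      rw [this]
      simp

lemma pv_ins_no (t : List Char) (j : Nat) (q : Nat → Bool)
    (h : ∀ k, j ≤ k → k < j + t.length → q k = false) :
    pvIns t j q = t := by
  induction t generalizing j with
  | nil => simp [pvIns]
  | cons c cs ih =>
      have hj : q j = false := h j le_rfl (by simp)
      simp only [pvIns, hj, if_neg Bool.false_ne_true, List.nil_append, List.cons.injEq, true_and]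
      exact ih (j + 1) (fun k hk₁ hk₂ => h k (by omega) (by simp at hk₂ ⊢; omega))

lemma pv_lemA (s : List Char) (loc : Int) (ws : List Int)
    (t : List Char) (j : Nat) (acc : List Char) (ht : t = s.drop j) :
    (PySem.List.enumerate (PySem.List.pyRange (loc + (j : Int)) (loc + (s.length : Int))) (j : Int)).foldl
      (fun acc ji =>
        (if ws.contains ji.2 then acc ++ [' '] else acc) ++
          ((PySem.List.pyGet? s ji.1).map (fun c => [c])).getD [])
      acc
      = acc ++ pvIns t j (fun k => ws.contains (loc + (k : Int))) := by
  induction t generalizing j acc with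
  | nil =>
      have hlen : s.length ≤ j := by
        have h := congrArg List.length ht
        simp at h
        omega
      have hle : loc + (s.length : Int) ≤ loc + (j : Int) := by
        have : (s.length : Int) ≤ (j : Int) := by exact_mod_cast hlen
        omega
      have hnil : PySem.List.pyRange (loc + (j : Int)) (loc + (s.length : Int)) = [] := by
        simp [PySem.List.pyRange]
        omega
      rw [hnil]
      simp [pvIns, PySem.List.enumerate]
  | cons c cs ih =>
      have hj : j < s.length := by
        have h := congrArg List.length ht
        simp at h
        omega
      have hget : s[j] = c := by
        have := List.drop_eq_getElem_cons hj
        rw [this] at ht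
        exact (List.cons.injEq _ _ _ _ ▸ ht).1.symm
      have hcs : cs = s.drop (j + 1) := by
        have := List.drop_eq_getElem_cons hj
        rw [this] at ht
        exact (List.cons.injEq _ _ _ _ ▸ ht).2
      have hlt : loc + (j : Int) < loc + (s.length : Int) := by
        have : (j : Int) < (s.length : Int) := by exact_mod_cast hj
        omega
      rw [PySem.List.pyRange_one_cons hlt, PySem.List.enumerate_cons]
      simp only [List.foldl_cons]
      have hcast1 : (j : Int) + 1 = ((j + 1 : Nat) : Int) := by push_cast; ring
      have hcast2 : loc + (j : Int) + 1 = loc + ((j + 1 : Nat) : Int) := by push_cast; ring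
      rw [hcast1, hcast2, ih (j + 1) _ hcs]
      simp only [PySem.List.pyGet?_natCast, List.getElem?_eq_getElem hj, hget, pvIns]
      split_ifs <;> simp

lemma pv_lemMain (s : List Char) (q : Nat → Bool) (rels : List Int) (m : Nat)
    (hm : m < s.length)
    (hpw : rels.Pairwise (· < ·))
    (hbd : ∀ r ∈ rels, (m : Int) < r ∧ r < (s.length : Int))
    (hch : ∀ k : Nat, m < k → k < s.length → ((k : Int) ∈ rels ↔ q k = true)) :
    PySem.Chars.join [' ']
        (pvBP s rels (m : Int) ++ [PySem.List.slice s (some (pvLast rels (m : Int)))])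
      = pvInsTail (s.drop m) m q := by
  induction rels generalizing m with
  | nil =>
      rw [pvBP, pvLast, List.nil_append, PySem.Chars.join_singleton,
        PySem.List.slice_from _ (Int.natCast_nonneg m), Int.toNat_natCast]
      rw [List.drop_eq_getElem_cons hm, pvInsTail]
      congr 1
      refine (pv_ins_no _ _ _ ?_).symm
      intro k hk₁ hk₂
      have hklen : k < s.length := by
        have hl : (s.drop (m + 1)).length = s.length - (m + 1) := List.length_drop ..
        omega
      have := hch k (by omega) hklen
      simp only [List.not_mem_nil] at this
      by_contra hq
      simp only [Bool.not_eq_false] at hq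
      exact this.mpr hq
  | cons r rs ih =>
      obtain ⟨hmr, hrlen⟩ := hbd r (List.mem_cons_self ..)
      have hr0 : 0 ≤ r := by omega
      set m' : Nat := r.toNat with hm'
      have hrm' : r = (m' : Int) := (Int.toNat_of_nonneg hr0).symm
      have hmm' : m < m' := by omega
      have hm'len : m' < s.length := by omega
      rw [pvBP, pvLast]
      have hslice : PySem.List.slice s (some (m : Int)) (some r)
          = (s.drop m).take (m' - m) := by
        rw [PySem.List.slice_toNat s (Int.natCast_nonneg m) hr0, Int.toNat_natCast]
      have htail : ∃ y ys, pvBP s rs r ++ [PySem.List.slice s (some (pvLast rs r))] = y :: ys := by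
        cases h : pvBP s rs r with
        | nil =>
            exact ⟨PySem.List.slice s (some (pvLast rs r)), [], by simp [h]⟩
        | cons p ps =>
            exact ⟨p, ps ++ [PySem.List.slice s (some (pvLast rs r))], by simp⟩
      obtain ⟨y, ys, hys⟩ := htail
      rw [List.cons_append, hys, PySem.Chars.join_cons_cons, ← hys]
      have hih : PySem.Chars.join [' ']
          (pvBP s rs (m' : Int) ++ [PySem.List.slice s (some (pvLast rs (m' : Int)))])
          = pvInsTail (s.drop m') m' q := by
        refine ih m' hm'len hpw.of_cons ?_ ?_
        · intro r' hr'
          refine ⟨?_, (hbd r' (List.mem_cons_of_mem _ hr')).2⟩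
          have := (List.pairwise_cons.mp hpw).1 r' hr'
          omega
        · intro k hk₁ hk₂
          rw [← hch k (by omega) hk₂]
          constructor
          · intro hmem; exact List.mem_cons_of_mem _ hmem
          · intro hmem
            rcases List.mem_cons.mp hmem with h | h
            · exfalso; rw [hrm'] at h
              have : k = m' := by exact_mod_cast h
              omega
            · exact h
      rw [hslice, hrm', hih]
      -- right side: split the suffix at m'
      have hside : ∀ k, m + 1 ≤ k →
          k < m + 1 + ((s.drop (m + 1)).take (m' - m - 1)).length → q k = false := by
        intro k hk₁ hk₂
        have hlen1 : ((s.drop (m + 1)).take (m' - m - 1)).length = m' - m - 1 := by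
          rw [List.length_take, List.length_drop]; omega
        rw [hlen1] at hk₂
        have hklen : k < s.length := by omega
        have := hch k (by omega) hklen
        by_contra hqk
        simp only [Bool.not_eq_false] at hqk
        rcases List.mem_cons.mp (this.mpr hqk) with h | h
        · rw [hrm'] at h
          have : k = m' := by exact_mod_cast h
          omega
        · have := (List.pairwise_cons.mp hpw).1 _ h
          omega
      have hdd : (s.drop (m + 1)).drop (m' - m - 1) = s.drop m' := by
        rw [List.drop_drop]
        congr 1
        omega
      have hsplit : s.drop (m + 1) = (s.drop (m + 1)).take (m' - m - 1) ++ s.drop m' := by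
        conv_lhs => rw [← List.take_append_drop (m' - m - 1) (s.drop (m + 1))]
        rw [hdd]
      have hlen1 : ((s.drop (m + 1)).take (m' - m - 1)).length = m' - m - 1 := by
        rw [List.length_take, List.length_drop]; omega
      have hq' : q m' = true := by
        rw [← hch m' hmm' hm'len, ← hrm']
        exact List.mem_cons_self ..
      have hspace : pvIns (s.drop m') m' q = ' ' :: pvInsTail (s.drop m') m' q := by
        rw [List.drop_eq_getElem_cons hm'len, pvIns, pvInsTail, hq']
        simp
      have htake : (s.drop m).take (m' - m) = s[m] :: (s.drop (m + 1)).take (m' - m - 1) := by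
        rw [List.drop_eq_getElem_cons hm]
        have he : m' - m = (m' - m - 1) + 1 := by omega
        rw [he, List.take_succ_cons]
        simp
      have hR : pvInsTail (s.drop m) m q
          = (s.drop m).take (m' - m) ++ [' '] ++ pvInsTail (s.drop m') m' q := by
        conv_lhs => rw [List.drop_eq_getElem_cons hm]
        rw [pvInsTail]
        conv_lhs => rw [hsplit]
        rw [pv_ins_append, hlen1]
        rw [show m + 1 + (m' - m - 1) = m' from by omega]
        rw [pv_ins_no _ _ _ hside, hspace, htake]
        simp
      rw [hR]

lemma pv_lemTop (s : List Char) (q : Nat → Bool) (rels : List Int)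
    (hpw : rels.Pairwise (· < ·))
    (hbd : ∀ r ∈ rels, 0 ≤ r ∧ r < (s.length : Int))
    (hch : ∀ k : Nat, k < s.length → ((k : Int) ∈ rels ↔ q k = true)) :
    PySem.Chars.join [' ']
        (pvBP s rels 0 ++ [PySem.List.slice s (some (pvLast rels 0))])
      = pvIns s 0 q := by
  cases rels with
  | nil =>
      rw [pvBP, pvLast, List.nil_append, PySem.Chars.join_singleton,
        PySem.List.slice_from _ le_rfl]
      simp only [Int.toNat_zero, List.drop_zero]
      refine (pv_ins_no _ _ _ ?_).symm
      intro k _ hk₂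
      have := hch k (by omega)
      simp only [List.not_mem_nil] at this
      by_contra hq
      simp only [Bool.not_eq_false] at hq
      exact this.mpr hq
  | cons r rs =>
      obtain ⟨hr0, hrlen⟩ := hbd r (List.mem_cons_self ..)
      set m' : Nat := r.toNat with hm'
      have hrm' : r = (m' : Int) := (Int.toNat_of_nonneg hr0).symm
      have hm'len : m' < s.length := by omega
      rw [pvBP, pvLast]
      have hslice : PySem.List.slice s (some (0 : Int)) (some r) = s.take m' := by
        rw [PySem.List.slice_toNat s le_rfl hr0]
        simp
        omega
      have htail : ∃ y ys, pvBP s rs r ++ [PySem.List.slice s (some (pvLast rs r))] = y :: ys := by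
        cases h : pvBP s rs r with
        | nil =>
            exact ⟨PySem.List.slice s (some (pvLast rs r)), [], by simp [h]⟩
        | cons p ps =>
            exact ⟨p, ps ++ [PySem.List.slice s (some (pvLast rs r))], by simp⟩
      obtain ⟨y, ys, hys⟩ := htail
      rw [List.cons_append, hys, PySem.Chars.join_cons_cons, ← hys]
      have hih : PySem.Chars.join [' ']
          (pvBP s rs (m' : Int) ++ [PySem.List.slice s (some (pvLast rs (m' : Int)))])
          = pvInsTail (s.drop m') m' q := by
        refine pv_lemMain s q rs m' hm'len hpw.of_cons ?_ ?_
        · intro r' hr'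
          refine ⟨?_, (hbd r' (List.mem_cons_of_mem _ hr')).2⟩
          have := (List.pairwise_cons.mp hpw).1 r' hr'
          omega
        · intro k hk₁ hk₂
          rw [← hch k hk₂]
          constructor
          · intro hmem; exact List.mem_cons_of_mem _ hmem
          · intro hmem
            rcases List.mem_cons.mp hmem with h | h
            · exfalso; rw [hrm'] at h
              have : k = m' := by exact_mod_cast h
              omega
            · exact h
      rw [hslice, hrm', hih]
      -- right side: split s at m'
      have hside : ∀ k, 0 ≤ k → k < 0 + (s.take m').length → q k = false := by
        intro k _ hk₂
        have hlen1 : (s.take m').length = m' := by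
          rw [List.length_take]; omega
        rw [hlen1] at hk₂
        simp only [Nat.zero_add] at hk₂
        have hklen : k < s.length := by omega
        have := hch k hklen
        by_contra hqk
        simp only [Bool.not_eq_false] at hqk
        rcases List.mem_cons.mp (this.mpr hqk) with h | h
        · rw [hrm'] at h
          have : k = m' := by exact_mod_cast h
          omega
        · have := (List.pairwise_cons.mp hpw).1 _ h
          omega
      have hlen1 : (s.take m').length = m' := by
        rw [List.length_take]; omega
      have hq' : q m' = true := by
        rw [← hch m' hm'len, ← hrm']
        exact List.mem_cons_self ..
      have hspace : pvIns (s.drop m') m' q = ' ' :: pvInsTail (s.drop m') m' q := by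
        rw [List.drop_eq_getElem_cons hm'len, pvIns, pvInsTail, hq']
        simp
      conv_rhs => rw [← List.take_append_drop m' s]
      rw [pv_ins_append, hlen1, Nat.zero_add, pv_ins_no _ _ _ hside, hspace]
      simp

-- ===== VERDICT (by name: the statement is the Claim_ definition above) =====
set_option maxHeartbeats 1000000 in
theorem fix_sent_py_spec : Claim_equal_fix_sent_py := by
  intro sentence doc ws _
  unfold Spec_fix_sent_py fix_sent_py fix_sent_py_alt
  dsimp only
  set s : List Char := PySem.Chars.replace sentence.toList [' '] [] with hs
  set loc : Int := PySem.Chars.find doc.toList s with hloc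
  set q : Nat → Bool := fun k => ws.contains (loc + (k : Int)) with hq
  set rels : List Int :=
    PySem.List.sorted
      (PySem.Set.ofList
        ((ws.filter (fun i => decide (0 ≤ i - loc) && decide (i - loc < (s.length : Int)))).map
          (fun i => i - loc)))
      (fun x => x) with hrels
  congr 1
  congr 1
  -- B side: turn the fold into pvBP / pvLast
  rw [pv_fold_bp s rels [] 0, List.nil_append]
  -- A side via pv_lemA at j = 0
  have hA := pv_lemA s loc ws s 0 [] (by simp)
  simp only [Nat.cast_zero, add_zero, List.nil_append] at hA
  rw [hA]
  -- rels facts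
  have hperm : rels.Perm (PySem.Set.ofList
      ((ws.filter (fun i => decide (0 ≤ i - loc) && decide (i - loc < (s.length : Int)))).map
        (fun i => i - loc))) := PySem.List.sorted_perm _ _ _
  have hmem : ∀ x : Int, x ∈ rels ↔
      ∃ i ∈ ws, (0 ≤ i - loc ∧ i - loc < (s.length : Int)) ∧ i - loc = x := by
    intro x
    rw [hperm.mem_iff, PySem.Set.mem_ofList, List.mem_map]
    constructor
    · rintro ⟨i, hi, hix⟩
      have := List.mem_filter.mp hi
      refine ⟨i, this.1, ?_, hix⟩
      have h2 := this.2
      simp only [Bool.and_eq_true, decide_eq_true_eq] at h2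
      exact h2
    · rintro ⟨i, hi, hcond, hix⟩
      refine ⟨i, List.mem_filter.mpr ⟨hi, ?_⟩, hix⟩
      simp only [Bool.and_eq_true, decide_eq_true_eq]
      exact hcond
  have hnd : rels.Nodup := hperm.nodup_iff.mpr (PySem.Set.nodup_ofList _)
  have hpw : rels.Pairwise (· < ·) := by
    have hle : rels.Pairwise (fun a b => a ≤ b) := PySem.List.sorted_pairwise _ _
    exact (hle.and hnd).imp (fun h => lt_of_le_of_ne h.1 h.2)
  refine (pv_lemTop s q rels hpw ?_ ?_).symm
  · intro r hr
    obtain ⟨i, _, hcond, hix⟩ := (hmem r).mp hr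
    rw [← hix]; exact hcond
  · intro k hk
    rw [hmem]
    constructor
    · rintro ⟨i, hi, _, hix⟩
      have : i = loc + (k : Int) := by omega
      rw [hq]
      simp only [List.contains_eq_mem, decide_eq_true_eq]
      rwa [← this]
    · intro hqk
      rw [hq] at hqk
      simp only [List.contains_eq_mem, decide_eq_true_eq] at hqk
      refine ⟨loc + (k : Int), hqk, ⟨by omega, ?_⟩, by omega⟩
      have : (k : Int) < (s.length : Int) := by exact_mod_cast hk
      omega
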